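-- pv_equiv track=rewrite | github.com/andyjliu/sotopia-diplomacy | src/evaluate_utils.py | get_orders
-- ===== SOURCE A (Python) =====
-- def get_orders(data, phase_name, country_name):
--     country_name = country_name.upper()
--     lines = data.split('\n')
--     current_phase = ''
--     current_country = ''
--     result = ''
--
--     for line in lines:
--         line = line.strip()
--         if not line:
--             continue
--
--         if ':' not in line:
--             current_phase = line
--             continue
--
--         country, orders = line.split(':', 1)
--         current_country = country.strip()
--
--         if current_phase == phase_name and current_country == country_name:
--             return orders.strip()
--
--     return ''
-- ===== SOURCE B (Python) =====
-- def get_orders(data, phase_name, country_name):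
--     # Build an index of first-seen (phase, country) -> orders, then look up.
--     table = {}
--     cur = ''
--     for raw in data.split('\n'):
--         line = raw.strip()
--         if not line:
--             continue
--         if ':' not in line:
--             cur = line
--         else:
--             country, orders = line.split(':', 1)
--             table.setdefault((cur, country.strip()), orders.strip())
--     return table.get((phase_name, country_name.upper()), '')
-- ===== Notes on version B (the rewrite author's own statement) =====
-- stated objective: alternative
-- what changed: Replaces the early-return streaming scan with a build-index-then-lookup pass: one loop fills a dict keyed by (phase, country) via setdefault (first occurrence wins), then the answer is a single dict lookup.
import Mathlib
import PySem

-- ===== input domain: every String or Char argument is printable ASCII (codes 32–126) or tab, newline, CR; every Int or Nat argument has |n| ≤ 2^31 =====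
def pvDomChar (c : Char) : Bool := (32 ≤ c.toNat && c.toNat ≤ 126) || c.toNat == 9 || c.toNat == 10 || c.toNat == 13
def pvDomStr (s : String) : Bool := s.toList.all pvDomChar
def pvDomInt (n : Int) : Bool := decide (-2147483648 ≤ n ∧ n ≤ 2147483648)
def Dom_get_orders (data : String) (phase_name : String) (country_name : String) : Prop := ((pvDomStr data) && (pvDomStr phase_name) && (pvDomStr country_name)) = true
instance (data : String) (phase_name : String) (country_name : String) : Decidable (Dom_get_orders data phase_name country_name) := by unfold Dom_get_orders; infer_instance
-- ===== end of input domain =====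

-- B replaces A's early-return streaming scan with a build-index(dict)-then-lookup decomposition (objective: alternative).

-- ===== PORT A =====
-- streaming scan with early return; state = current_phase
def pvGoA (lines : List String) (phase_name : String) (country_name : String)
    (current_phase : String) : String :=
  match lines with
  | [] => ""
  | l :: rest =>
    let line := PySem.Str.strip l
    if line = "" then pvGoA rest phase_name country_name current_phase
    else if PySem.Str.isIn ":" line = false then pvGoA rest phase_name country_name line
    else
      let parts := (PySem.Str.splitMax? line ":" 1).getD []
      let current_country := PySem.Str.strip (parts.getD 0 "")
      if current_phase = phase_name ∧ current_country = country_name then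
        PySem.Str.strip (parts.getD 1 "")
      else pvGoA rest phase_name country_name current_phase

def get_orders (data : String) (phase_name : String) (country_name : String) : String :=
  pvGoA ((PySem.Str.split? data "\n").getD []) phase_name (PySem.Str.upper country_name) ""

-- ===== PORT B =====
-- one loop fills the table (setdefault: first occurrence wins); then one lookup
def pvStepB (st : PySem.Dict (String × String) String × String) (raw : String) :
    PySem.Dict (String × String) String × String :=
  let line := PySem.Str.strip raw
  if line = "" then st
  else if PySem.Str.isIn ":" line = false then (st.1, line)
  else
    let parts := (PySem.Str.splitMax? line ":" 1).getD []
    (st.1.setdefault (st.2, PySem.Str.strip (parts.getD 0 ""))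
        (PySem.Str.strip (parts.getD 1 "")), st.2)

def get_orders_alt (data : String) (phase_name : String) (country_name : String) : String :=
  let st := ((PySem.Str.split? data "\n").getD []).foldl pvStepB (PySem.Dict.empty, "")
  st.1.getD (phase_name, PySem.Str.upper country_name) ""

-- ===== PRECONDITION & SPEC =====
def Spec_get_orders (data : String) (phase_name : String) (country_name : String) (out : String) : Prop := out = get_orders_alt data phase_name country_name
instance (data : String) (phase_name : String) (country_name : String) (out : String) : Decidable (Spec_get_orders data phase_name country_name out) := by unfold Spec_get_orders; infer_instance

-- ===== CLAIM (what is proved, stated in full; the proofs are below) =====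
def Claim_equal_get_orders : Prop := ∀ (data : String) (phase_name : String) (country_name : String), Dom_get_orders data phase_name country_name → Spec_get_orders data phase_name country_name (get_orders data phase_name country_name)

-- ===== LEMMAS AND PROOFS =====

-- one step of B's fold, by branch
theorem pvStepB_blank (st : PySem.Dict (String × String) String × String) (raw : String)
    (h1 : PySem.Str.strip raw = "") : pvStepB st raw = st := by
  unfold pvStepB; rw [if_pos h1]

theorem pvStepB_phase (st : PySem.Dict (String × String) String × String) (raw : String)
    (h1 : ¬ PySem.Str.strip raw = "") (h2 : PySem.Str.isIn ":" (PySem.Str.strip raw) = false) :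
    pvStepB st raw = (st.1, PySem.Str.strip raw) := by
  unfold pvStepB; rw [if_neg h1, if_pos h2]

theorem pvStepB_colon (st : PySem.Dict (String × String) String × String) (raw : String)
    (h1 : ¬ PySem.Str.strip raw = "") (h2 : ¬ PySem.Str.isIn ":" (PySem.Str.strip raw) = false) :
    pvStepB st raw =
      (st.1.setdefault
        (st.2, PySem.Str.strip (((PySem.Str.splitMax? (PySem.Str.strip raw) ":" 1).getD []).getD 0 ""))
        (PySem.Str.strip (((PySem.Str.splitMax? (PySem.Str.strip raw) ":" 1).getD []).getD 1 "")), st.2) := by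
  unfold pvStepB; rw [if_neg h1, if_neg h2]

-- once the key is present, the B-fold never changes its value
theorem pvFoldB_preserve (lines : List String) (key : String × String) (v : String)
    (d : PySem.Dict (String × String) String) (cp : String)
    (h : d.get? key = some v) :
    ((lines.foldl pvStepB (d, cp)).1).get? key = some v := by
  induction lines generalizing d cp with
  | nil => exact h
  | cons l rest ih =>
    rw [List.foldl_cons]
    by_cases h1 : PySem.Str.strip l = ""
    · rw [pvStepB_blank _ _ h1]; exact ih d cp h
    · by_cases h2 : PySem.Str.isIn ":" (PySem.Str.strip l) = false
      · rw [pvStepB_phase _ _ h1 h2]; exact ih d _ h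
      · rw [pvStepB_colon _ _ h1 h2]
        apply ih
        by_cases hk : ((cp, PySem.Str.strip (((PySem.Str.splitMax? (PySem.Str.strip l) ":" 1).getD []).getD 0 "")) : String × String) = key
        · rw [hk, PySem.Dict.get?_setdefault_self, h]; rfl
        · rw [PySem.Dict.get?_setdefault_of_ne _ _ (Ne.symm hk)]; exact h

-- while the key is absent, the B-fold's final value at the key is A's streaming result
theorem pvFoldB_absent (lines : List String) (phase_name cn : String)
    (d : PySem.Dict (String × String) String) (cp : String)
    (h : d.get? (phase_name, cn) = none) :
    ((lines.foldl pvStepB (d, cp)).1).getD (phase_name, cn) ""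
      = pvGoA lines phase_name cn cp := by
  induction lines generalizing d cp with
  | nil =>
    rw [List.foldl_nil, PySem.Dict.getD_eq_get?_getD, h]; rfl
  | cons l rest ih =>
    rw [List.foldl_cons]
    by_cases h1 : PySem.Str.strip l = ""
    · rw [pvStepB_blank _ _ h1]
      unfold pvGoA; rw [if_pos h1]
      exact ih d cp h
    · by_cases h2 : PySem.Str.isIn ":" (PySem.Str.strip l) = false
      · rw [pvStepB_phase _ _ h1 h2]
        unfold pvGoA; rw [if_neg h1, if_pos h2]
        exact ih d _ h
      · rw [pvStepB_colon _ _ h1 h2]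
        unfold pvGoA
        rw [if_neg h1, if_neg h2]
        set parts := (PySem.Str.splitMax? (PySem.Str.strip l) ":" 1).getD [] with hp
        by_cases hk : ((cp, PySem.Str.strip (parts.getD 0 "")) : String × String) = (phase_name, cn)
        · have hc : cp = phase_name ∧ PySem.Str.strip (parts.getD 0 "") = cn :=
            Prod.mk.injEq .. ▸ hk
          rw [if_pos hc]
          have hins : (d.setdefault (cp, PySem.Str.strip (parts.getD 0 ""))
              (PySem.Str.strip (parts.getD 1 ""))).get? (phase_name, cn)
              = some (PySem.Str.strip (parts.getD 1 "")) := by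
            rw [hk, PySem.Dict.get?_setdefault_self, h]; rfl
          rw [PySem.Dict.getD_eq_get?_getD, pvFoldB_preserve rest _ _ _ cp hins]
          rfl
        · have hc : ¬ (cp = phase_name ∧ PySem.Str.strip (parts.getD 0 "") = cn) := by
            intro ⟨ha, hb⟩; exact hk (by rw [ha, hb])
          rw [if_neg hc]
          apply ih
          rw [PySem.Dict.get?_setdefault_of_ne _ _ (Ne.symm hk)]; exact h

-- ===== VERDICT (by name: the statement is the Claim_ definition above) =====
theorem get_orders_spec : Claim_equal_get_orders := by
  intro data phase_name country_name _
  unfold Spec_get_orders get_orders get_orders_alt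
  exact (pvFoldB_absent _ _ _ _ _ (PySem.Dict.get?_empty _)).symm
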